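-- pv_equiv track=rewrite | github.com/drathke924/userscripts | Advent_Of_Code_2020/day9.py | search_for_sum
-- ===== SOURCE A (Python) =====
-- def search_for_sum(data_in, size, target):
--     found, result = False, 0
--     for i in range(0, len(data_in)):
--         check_nums = data_in[i:i+size]
--         if max(check_nums) < target and sum(check_nums) == target:
--             found = True
--             result = max(check_nums) + min(check_nums)
--     return result, found
-- ===== SOURCE B (Python) =====
-- def search_for_sum(data_in, size, target):
--     n = len(data_in)
--     prefix = [0] * (n + 1)
--     for i in range(n):
--         prefix[i + 1] = prefix[i] + data_in[i]
--     for i in range(n - 1, -1, -1):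
--         hi = min(i + size, n)
--         if prefix[hi] - prefix[i] == target:
--             window = data_in[i:hi]
--             mx = max(window)
--             if mx < target:
--                 return mx + min(window), True
--     return 0, False
-- ===== Notes on version B (the rewrite author's own statement) =====
-- stated objective: faster
-- what changed: B precomputes prefix sums once and scans the windows backwards with an early return, testing each window's sum in O(1) and computing max/min only when the sum matches, instead of A's forward loop that slices and takes max/sum (and min) of every window.
import Mathlib
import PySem

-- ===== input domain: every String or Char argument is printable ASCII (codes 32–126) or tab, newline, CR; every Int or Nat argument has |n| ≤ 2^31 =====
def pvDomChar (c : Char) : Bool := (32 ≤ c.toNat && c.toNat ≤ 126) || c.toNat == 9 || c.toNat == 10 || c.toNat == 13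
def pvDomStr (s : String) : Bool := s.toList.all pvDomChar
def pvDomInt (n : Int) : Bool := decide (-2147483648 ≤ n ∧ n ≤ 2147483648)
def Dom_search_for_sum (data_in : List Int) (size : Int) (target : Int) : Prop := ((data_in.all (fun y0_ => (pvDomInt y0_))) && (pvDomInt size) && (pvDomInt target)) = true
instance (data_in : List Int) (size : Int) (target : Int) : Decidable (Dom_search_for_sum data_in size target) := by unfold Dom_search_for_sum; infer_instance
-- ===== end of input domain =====

-- B replaces A's per-index slice-sum/slice-max scan by prefix sums with a backward
-- early-returning scan (objective: faster — sum test is O(1) per window and max/min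
-- are only computed on sum hits).

-- ===== PORT A =====
def search_for_sum (data_in : List Int) (size : Int) (target : Int) : Int × Bool :=
  let st := (PySem.List.pyRange 0 data_in.length 1).foldl
    (fun (acc : Bool × Int) i =>
      let check_nums := PySem.List.slice data_in (some i) (some (i + size))
      match PySem.List.max? check_nums (fun y => y) with
      | some mx =>
          if mx < target ∧ check_nums.sum = target then
            (true, mx + (PySem.List.min? check_nums (fun y => y)).getD 0)
          else acc
      | none => acc)  -- max([]) raises in Python: excluded by Pre_
    (false, 0)
  (st.2, st.1)

-- ===== PORT B =====
-- the backward scan 'for i in range(n-1, -1, -1)' with early return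
def sfsGo (data_in : List Int) (size target n : Int) (pfx : List Int) :
    List Int → Int × Bool
  | [] => (0, false)
  | i :: rest =>
      let hi := min (i + size) n
      if PySem.List.pyGetD pfx hi 0 - PySem.List.pyGetD pfx i 0 = target then
        let window := PySem.List.slice data_in (some i) (some hi)
        match PySem.List.max? window (fun y => y) with
        | some mx =>
            if mx < target then (mx + (PySem.List.min? window (fun y => y)).getD 0, true)
            else sfsGo data_in size target n pfx rest
        | none => sfsGo data_in size target n pfx rest  -- max([]) raises: outside Pre_
      else sfsGo data_in size target n pfx rest

def search_for_sum_alt (data_in : List Int) (size : Int) (target : Int) : Int × Bool :=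
  let n : Int := data_in.length
  -- prefix = [0]; for x in data_in: prefix.append(prefix[-1] + x)
  let pfx := data_in.foldl (fun p x => p ++ [PySem.List.pyGetD p (-1) 0 + x]) [0]
  sfsGo data_in size target n pfx (PySem.List.pyRange (n - 1) (-1) (-1))

-- ===== PRECONDITION & SPEC =====
-- Pre_ excludes only inputs where Python A raises ValueError: a nonempty data_in with
-- size ≤ 0 makes the slice empty and max([]) raises.
def Pre_search_for_sum (data_in : List Int) (size : Int) (target : Int) : Prop :=
  data_in = [] ∨ 1 ≤ size
instance (data_in : List Int) (size : Int) (target : Int) : Decidable (Pre_search_for_sum data_in size target) := by unfold Pre_search_for_sum; infer_instance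
def pvWitness_search_for_sum : List Int × Int × Int := ([1, 2, 3, 4], 2, 5)

def Spec_search_for_sum (data_in : List Int) (size : Int) (target : Int) (out : Int × Bool) : Prop := out = search_for_sum_alt data_in size target
instance (data_in : List Int) (size : Int) (target : Int) (out : Int × Bool) : Decidable (Spec_search_for_sum data_in size target out) := by unfold Spec_search_for_sum; infer_instance

-- ===== CLAIM (what is proved, stated in full; the proofs are below) =====
def Claim_equal_search_for_sum : Prop := ∀ (data_in : List Int) (size : Int) (target : Int), Dom_search_for_sum data_in size target → Pre_search_for_sum data_in size target → Spec_search_for_sum data_in size target (search_for_sum data_in size target)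

-- ===== LEMMAS AND PROOFS =====

-- window of A at index i, and shared condition/value functions
def sfsWin (data_in : List Int) (size i : Int) : List Int :=
  PySem.List.slice data_in (some i) (some (i + size))

def sfsC (data_in : List Int) (size target i : Int) : Bool :=
  match PySem.List.max? (sfsWin data_in size i) (fun y => y) with
  | some mx => decide (mx < target ∧ (sfsWin data_in size i).sum = target)
  | none => false

def sfsV (data_in : List Int) (size i : Int) : Int :=
  (PySem.List.max? (sfsWin data_in size i) (fun y => y)).getD 0
    + (PySem.List.min? (sfsWin data_in size i) (fun y => y)).getD 0


-- prefix-building fold computes scanl of running sums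
theorem sfs_prefix_fold (l : List Int) : ∀ (ps : List Int) (c : Int),
    l.foldl (fun p x => p ++ [PySem.List.pyGetD p (-1) 0 + x]) (ps ++ [c])
      = ps ++ List.scanl (· + ·) c l := by
  induction l with
  | nil => intro ps c; simp [List.scanl]
  | cons x l ih =>
    intro ps c
    simp only [List.foldl_cons, PySem.List.pyGetD_neg_one_append_singleton]
    rw [ih (ps ++ [c]) (c + x)]
    simp [List.scanl_cons]

-- entries of the scanl are prefix sums
theorem sfs_scanl_getD (l : List Int) : ∀ (c : Int) (k : Nat), k ≤ l.length →
    (List.scanl (· + ·) c l).getD k 0 = c + (l.take k).sum := by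
  induction l with
  | nil =>
    intro c k hk
    match k, hk with
    | 0, _ => simp [List.scanl_nil]
  | cons x l ih =>
    intro c k hk
    cases k with
    | zero => simp [List.scanl_cons]
    | succ k =>
      simp only [List.scanl_cons, List.getD_cons_succ, List.take_succ_cons, List.sum_cons]
      rw [ih (c + x) k (by simpa using hk)]
      ring

-- A's window equals B's clamped window
theorem sfs_win_eq (d : List Int) (s i : Int) (hs : 1 ≤ s) (hi0 : 0 ≤ i)
    (hin : i < (d.length : Int)) :
    PySem.List.slice d (some i) (some (min (i + s) (d.length : Int))) = sfsWin d s i := by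
  unfold sfsWin
  rw [PySem.List.slice_toNat d hi0 (by omega), PySem.List.slice_toNat d hi0 (by omega)]
  rw [List.take_eq_take_iff]
  simp only [List.length_drop]
  omega

theorem sfs_win_ne_nil (d : List Int) (s i : Int) (hs : 1 ≤ s) (hi0 : 0 ≤ i)
    (hin : i < (d.length : Int)) : sfsWin d s i ≠ [] := by
  unfold sfsWin
  rw [PySem.List.slice_toNat d hi0 (by omega)]
  apply List.ne_nil_of_length_pos
  simp only [List.length_take, List.length_drop]
  omega

-- the prefix-sum test equals A's slice-sum test
theorem sfs_sum (d : List Int) (s i : Int) (hs : 1 ≤ s) (hi0 : 0 ≤ i)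
    (hin : i < (d.length : Int)) :
    (List.scanl (· + ·) 0 d).getD (min (i + s) (d.length : Int)).toNat 0
      - (List.scanl (· + ·) 0 d).getD i.toNat 0 = (sfsWin d s i).sum := by
  rw [sfs_scanl_getD d 0 _ (by omega), sfs_scanl_getD d 0 _ (by omega)]
  rw [← sfs_win_eq d s i hs hi0 hin]
  rw [PySem.List.slice_toNat d hi0 (by omega)]
  have h2 : d.take (min (i + s) (d.length : Int)).toNat
      = d.take i.toNat ++ (d.drop i.toNat).take ((min (i + s) (d.length : Int)).toNat - i.toNat) := by
    rw [← List.take_add]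
    congr 1
    omega
  rw [h2, List.sum_append]
  ring

-- A's loop body, characterised
theorem sfs_stepA (d : List Int) (s t i : Int) (acc : Bool × Int) :
    (match PySem.List.max? (sfsWin d s i) (fun y => y) with
     | some mx =>
         if mx < t ∧ (sfsWin d s i).sum = t then
           (true, mx + (PySem.List.min? (sfsWin d s i) (fun y => y)).getD 0)
         else acc
     | none => acc)
      = if sfsC d s t i then (true, sfsV d s i) else acc := by
  unfold sfsC sfsV
  cases h : PySem.List.max? (sfsWin d s i) (fun y => y) with
  | none => simp
  | some mx =>
    by_cases hc : mx < t ∧ (sfsWin d s i).sum = t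
    · simp [hc]
    · simp [hc]

-- A's fold finds the LAST matching window
theorem sfs_foldA (d : List Int) (s t : Int) (l : List Int) (acc : Bool × Int) :
    l.foldl
      (fun (acc : Bool × Int) i =>
        let check_nums := PySem.List.slice d (some i) (some (i + s))
        match PySem.List.max? check_nums (fun y => y) with
        | some mx =>
            if mx < t ∧ check_nums.sum = t then
              (true, mx + (PySem.List.min? check_nums (fun y => y)).getD 0)
            else acc
        | none => acc) acc
      = match l.reverse.find? (sfsC d s t) with
        | some i => (true, sfsV d s i)
        | none => acc := by
  induction l using List.reverseRecOn with
  | nil => simp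
  | append_singleton l x ih =>
    rw [List.foldl_append, List.foldl_cons, List.foldl_nil, List.reverse_append]
    simp only [List.reverse_cons, List.reverse_nil, List.nil_append, List.singleton_append,
      List.find?_cons]
    show (match PySem.List.max? (sfsWin d s x) (fun y => y) with
          | some mx =>
              if mx < t ∧ (sfsWin d s x).sum = t then
                (true, mx + (PySem.List.min? (sfsWin d s x) (fun y => y)).getD 0)
              else _
          | none => _) = _
    rw [sfs_stepA, ih]
    by_cases hx : sfsC d s t x
    · simp [hx]
    · simp [hx]

-- B's scan finds the FIRST matching window in its (reversed) index list
theorem sfs_goB (d : List Int) (s t : Int) (hs : 1 ≤ s) :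
    ∀ idxs : List Int, (∀ i ∈ idxs, 0 ≤ i ∧ i < (d.length : Int)) →
    sfsGo d s t (d.length : Int) (List.scanl (· + ·) 0 d) idxs
      = match idxs.find? (sfsC d s t) with
        | some i => (sfsV d s i, true)
        | none => (0, false) := by
  intro idxs
  induction idxs with
  | nil => intro _; simp [sfsGo]
  | cons i rest ih =>
    intro hmem
    obtain ⟨hi0, hin⟩ := hmem i (List.mem_cons_self ..)
    have hrest := ih (fun j hj => hmem j (List.mem_cons_of_mem _ hj))
    rw [sfsGo]
    simp only []
    rw [PySem.List.pyGetD_of_nonneg _ 0 (by omega), PySem.List.pyGetD_of_nonneg _ 0 hi0]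
    rw [sfs_sum d s i hs hi0 hin, sfs_win_eq d s i hs hi0 hin, hrest, List.find?_cons]
    cases h : PySem.List.max? (sfsWin d s i) (fun y => y) with
    | none =>
      exact absurd ((PySem.List.max?_eq_none_iff _ _).mp h) (sfs_win_ne_nil d s i hs hi0 hin)
    | some mx =>
      by_cases h1 : (sfsWin d s i).sum = t
      · by_cases h2 : mx < t
        · simp [sfsC, sfsV, h, h1, h2]
        · simp [sfsC, h, h1, h2]
      · simp [sfsC, h, h1]

-- ===== VERDICT (by name: the statement is the Claim_ definition above) =====
theorem search_for_sum_spec : Claim_equal_search_for_sum := by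
  intro d s t _ hpre
  unfold Spec_search_for_sum
  by_cases hs : 1 ≤ s
  · show search_for_sum d s t = search_for_sum_alt d s t
    unfold search_for_sum search_for_sum_alt
    simp only []
    rw [sfs_foldA d s t]
    have hpfx : d.foldl (fun p x => p ++ [PySem.List.pyGetD p (-1) 0 + x]) [0]
        = List.scanl (· + ·) 0 d := by
      simpa using sfs_prefix_fold d [] 0
    rw [hpfx]
    have hrange : PySem.List.pyRange ((d.length : Int) - 1) (-1) (-1)
        = (PySem.List.pyRange 0 (d.length : Int) 1).reverse := by
      rw [PySem.List.pyRange_neg_one_eq_reverse]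
      norm_num
    rw [hrange]
    rw [sfs_goB d s t hs _ (fun i hi => by
      rw [List.mem_reverse, PySem.List.mem_pyRange_one] at hi
      exact hi)]
    cases (PySem.List.pyRange 0 (d.length : Int) 1).reverse.find? (sfsC d s t) <;> rfl
  · have hd : d = [] := by
      rcases hpre with h | h
      · exact h
      · omega
    subst hd
    show search_for_sum [] s t = search_for_sum_alt [] s t
    simp [search_for_sum, search_for_sum_alt, sfsGo,
      PySem.List.pyRange_one_eq_nil (by norm_num : (0:Int) ≤ 0),
      PySem.List.pyRange_neg_one_eq_nil (by norm_num : (-1:Int) ≤ -1)]
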